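-- pv_equiv track=rewrite | github.com/kleskjr/kaggle-cancer | src/check_stats.py | standardize_word
-- ===== SOURCE A (Python) =====
-- def standardize_word(word):
--     """Standardize word.
--
--     A standard word is lower cased and only contains alphabetic
--     characters. Return two strings: (std_word, illegal_chars)
--     """
--     # string containing the illegal characters found in the word
--     illegal = ''
--     # make word lower-case
--     word = word.lower()
--     if not word.isalpha():
--         # there are non alphabetic chars in the word
--         for char in word:
--             # collect non alphabetic chars
--             if not char.isalpha():
--                 if not char=='-':
--                     illegal += char
--         # remove non alphabetic chars from the word
--         translation = str.maketrans({key: None for key in illegal})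
--         word = word.translate(translation) # -- Python 3
--     return word#, illegal
-- ===== SOURCE B (Python) =====
-- def standardize_word(word):
--     """Standardize word: lower-case it and keep only alphabetic chars and '-'."""
--     return ''.join(c for c in word.lower() if c.isalpha() or c == '-')
-- ===== Notes on version B (the rewrite author's own statement) =====
-- stated objective: simpler
-- what changed: B replaces A's two-phase scheme (collect illegal characters into a string, build a translation table, translate) by a single filtering pass over the lowered word keeping alphabetic characters and '-'.
import Mathlib
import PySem

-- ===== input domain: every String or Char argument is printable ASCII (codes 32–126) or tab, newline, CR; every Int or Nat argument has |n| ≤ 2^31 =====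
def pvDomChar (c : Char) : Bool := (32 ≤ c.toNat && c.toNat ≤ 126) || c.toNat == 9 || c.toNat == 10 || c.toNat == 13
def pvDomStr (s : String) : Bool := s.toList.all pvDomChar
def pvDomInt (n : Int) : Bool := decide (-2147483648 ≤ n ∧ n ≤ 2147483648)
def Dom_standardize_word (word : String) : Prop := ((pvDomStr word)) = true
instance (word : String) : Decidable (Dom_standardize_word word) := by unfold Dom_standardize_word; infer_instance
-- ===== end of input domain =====

-- B replaces A's collect-illegal-then-translate scheme by a single filtering pass (objective: simpler).

-- ===== PORT A =====
-- literal port of A: lower the word; if not all-alphabetic, collect the non-alphabetic,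
-- non-hyphen characters into `illegal` and then remove them (str.translate with a table
-- mapping each char of `illegal` to None deletes exactly the characters occurring in
-- `illegal`; ported exactly as that deletion filter).
def standardize_word (word : String) : String :=
  let w := PySem.Str.lower word
  if PySem.Str.strIsalpha w then w
  else
    let illegal : List Char := w.toList.foldl
      (fun acc c =>
        if !(PySem.Chars.isalpha c) then
          if !(c == '-') then acc ++ [c] else acc
        else acc) []
    String.ofList (w.toList.filter (fun c => !(illegal.contains c)))

-- ===== PORT B =====
def standardize_word_alt (word : String) : String :=
  String.ofList ((PySem.Str.lower word).toList.filter
    (fun c => PySem.Chars.isalpha c || c == '-'))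

-- ===== PRECONDITION & SPEC =====
def Spec_standardize_word (word : String) (out : String) : Prop := out = standardize_word_alt word
instance (word : String) (out : String) : Decidable (Spec_standardize_word word out) := by unfold Spec_standardize_word; infer_instance

-- ===== CLAIM (what is proved, stated in full; the proofs are below) =====
def Claim_equal_standardize_word : Prop := ∀ (word : String), Dom_standardize_word word → Spec_standardize_word word (standardize_word word)

-- ===== LEMMAS AND PROOFS =====

-- For characters of the lowered word, membership in A's `illegal` list is exactly
-- "non-alphabetic and not a hyphen".
theorem pv_illegal_mem (l : List Char) (c : Char) (hc : c ∈ l) :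
    ((l.foldl (fun acc c =>
        if !(PySem.Chars.isalpha c) then
          if !(c == '-') then acc ++ [c] else acc
        else acc) []).contains c)
      = (!(PySem.Chars.isalpha c) && !(c == '-')) := by
  have hfun : (fun (acc : List Char) c =>
        if !(PySem.Chars.isalpha c) then
          if !(c == '-') then acc ++ [c] else acc
        else acc)
      = (fun acc c =>
        if (!(PySem.Chars.isalpha c) && !(c == '-')) then acc ++ [c] else acc) := by
    funext acc x
    by_cases h1 : PySem.Chars.isalpha x <;> by_cases h2 : x = '-' <;> simp [h1, h2]
  rw [hfun]
  have h := PySem.List.foldl_append_if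
    (fun c => !(PySem.Chars.isalpha c) && !(c == '-')) (id) l []
  simp only [id] at h
  rw [h]
  simp only [List.nil_append, List.map_id]
  cases h2 : c == '-' <;> simp_all [List.mem_filter]

theorem pv_main (word : String) : standardize_word word = standardize_word_alt word := by
  unfold standardize_word standardize_word_alt
  set w := PySem.Str.lower word with hw
  by_cases hA : PySem.Str.strIsalpha w = true
  · -- all characters alphabetic: B's filter keeps everything
    simp only [hA, if_pos]
    have hall : ∀ c ∈ w.toList, PySem.Chars.isalpha c = true := by
      rw [PySem.Str.strIsalpha_eq, PySem.Chars.strIsalpha] at hA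
      simp only [Bool.and_eq_true, List.all_eq_true] at hA
      exact fun c hc => hA.2 c hc
    rw [List.filter_eq_self.mpr (by intro c hc; simp [hall c hc])]
    exact String.ofList_toList.symm
  · simp only [hA, if_neg, Bool.false_eq_true, not_false_iff]
    congr 1
    apply List.filter_congr
    intro c hc
    rw [pv_illegal_mem _ c hc]
    by_cases h1 : PySem.Chars.isalpha c <;> by_cases h2 : c = '-' <;> simp [h1, h2]

-- ===== VERDICT (by name: the statement is the Claim_ definition above) =====
theorem standardize_word_spec : Claim_equal_standardize_word := by
  intro word _
  unfold Spec_standardize_word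
  exact pv_main word
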